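-- pv_equiv track=rewrite | github.com/chandrahasM/AG2-SDLC | agents/repository_analyzer/api_analyzer.py | _identify_side_effects
-- ===== SOURCE A (Python) =====
-- from typing import Dict, List, Any, Optional, Set, Tuple
--
-- def _identify_side_effects(calls: List[str]) -> List[str]:
--     """Identify side effects from function calls"""
--     side_effects = []
--
--     for call in calls:
--         call_lower = call.lower()
--         if any(word in call_lower for word in ['save', 'create', 'update', 'delete']):
--             side_effects.append(f"Data modification: {call}")
--         elif any(word in call_lower for word in ['send', 'notify', 'email', 'publish']):
--             side_effects.append(f"External communication: {call}")
--         elif any(word in call_lower for word in ['log', 'track', 'audit']):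
--             side_effects.append(f"Logging/auditing: {call}")
--         elif any(word in call_lower for word in ['cache', 'store', 'session']):
--             side_effects.append(f"State modification: {call}")
--
--     return side_effects
-- ===== SOURCE B (Python) =====
-- # B: category-major staged passes -- instead of classifying each call through an
-- # elif chain, make one whole-list pass PER CATEGORY over a parallel list of
-- # optional labels; earlier passes claim a slot, later passes only fill empty
-- # slots, and a final filter drops unlabeled calls.
-- _RULES = [
--     ("Data modification", ("save", "create", "update", "delete")),
--     ("External communication", ("send", "notify", "email", "publish")),
--     ("Logging/auditing", ("log", "track", "audit")),
--     ("State modification", ("cache", "store", "session")),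
-- ]
--
--
-- def _identify_side_effects(calls):
--     labels = [None] * len(calls)
--     for label, words in _RULES:
--         labels = [
--             cur if cur is not None
--             else (f"{label}: {call}"
--                   if any(w in call.lower() for w in words) else None)
--             for cur, call in zip(labels, calls)
--         ]
--     return [x for x in labels if x is not None]
-- ===== Notes on version B (the rewrite author's own statement) =====
-- stated objective: alternative
-- what changed: Call-major elif chain replaced by four category-major whole-list passes over a parallel list of optional labels (earlier passes claim slots, later passes fill only empty ones), followed by a filter; the traversal order is category-by-category instead of call-by-call.
import Mathlib
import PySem

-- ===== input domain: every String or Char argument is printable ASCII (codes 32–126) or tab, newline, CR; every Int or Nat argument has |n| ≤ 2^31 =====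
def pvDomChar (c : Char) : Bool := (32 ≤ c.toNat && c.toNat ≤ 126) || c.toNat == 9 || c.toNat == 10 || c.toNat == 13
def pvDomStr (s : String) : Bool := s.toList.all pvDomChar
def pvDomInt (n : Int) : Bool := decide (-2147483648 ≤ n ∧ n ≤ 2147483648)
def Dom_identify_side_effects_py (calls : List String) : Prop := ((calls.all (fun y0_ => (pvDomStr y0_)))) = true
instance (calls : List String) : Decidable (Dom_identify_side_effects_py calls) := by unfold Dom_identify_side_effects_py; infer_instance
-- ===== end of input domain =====

-- B replaces A's call-major elif chain by four category-major whole-list passes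
-- over a parallel list of optional labels, then a filter (alternative traversal order, same cost).

-- ===== PORT A =====
def identify_side_effects_py (calls : List String) : List String :=
  calls.foldl (fun side_effects call =>
    let call_lower := PySem.Str.lower call
    if ["save", "create", "update", "delete"].any (fun word => PySem.Str.isIn word call_lower) then
      side_effects ++ ["Data modification: " ++ call]
    else if ["send", "notify", "email", "publish"].any (fun word => PySem.Str.isIn word call_lower) then
      side_effects ++ ["External communication: " ++ call]
    else if ["log", "track", "audit"].any (fun word => PySem.Str.isIn word call_lower) then
      side_effects ++ ["Logging/auditing: " ++ call]
    else if ["cache", "store", "session"].any (fun word => PySem.Str.isIn word call_lower) then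
      side_effects ++ ["State modification: " ++ call]
    else side_effects) []

-- ===== PORT B =====
def pvRules : List (String × List String) :=
  [("Data modification", ["save", "create", "update", "delete"]),
   ("External communication", ["send", "notify", "email", "publish"]),
   ("Logging/auditing", ["log", "track", "audit"]),
   ("State modification", ["cache", "store", "session"])]

-- one category pass: fill only the empty slots whose call matches a keyword
def pvPass (label : String) (words : List String) (labels : List (Option String)) (calls : List String) : List (Option String) :=
  List.zipWith (fun cur call =>
    match cur with
    | some s => some s
    | none =>
      if words.any (fun w => PySem.Str.isIn w (PySem.Str.lower call)) then
        some (label ++ ": " ++ call)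
      else none) labels calls

def identify_side_effects_py_alt (calls : List String) : List String :=
  (pvRules.foldl (fun labels r => pvPass r.1 r.2 labels calls)
    (List.replicate calls.length none)).filterMap id

-- ===== PRECONDITION & SPEC =====
def Spec_identify_side_effects_py (calls : List String) (out : List String) : Prop := out = identify_side_effects_py_alt calls
instance (calls : List String) (out : List String) : Decidable (Spec_identify_side_effects_py calls out) := by unfold Spec_identify_side_effects_py; infer_instance

-- ===== CLAIM (what is proved, stated in full; the proofs are below) =====
def Claim_equal_identify_side_effects_py : Prop := ∀ (calls : List String), Dom_identify_side_effects_py calls → Spec_identify_side_effects_py calls (identify_side_effects_py calls)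

-- ===== LEMMAS AND PROOFS =====

-- proof-only: the per-call value the staged passes end up computing
def pvStep (c : String) (cur : Option String) (r : String × List String) : Option String :=
  match cur with
  | some s => some s
  | none =>
    if r.2.any (fun w => PySem.Str.isIn w (PySem.Str.lower c)) then some (r.1 ++ ": " ++ c)
    else none

lemma pvPass_map (label : String) (words : List String) (g : String → Option String)
    (calls : List String) :
    pvPass label words (calls.map g) calls
      = calls.map (fun c => pvStep c (g c) (label, words)) := by
  induction calls with
  | nil => rfl
  | cons x xs ih => simp [pvPass, pvStep] at ih ⊢; exact ih

lemma foldl_pass_map (rs : List (String × List String)) (g : String → Option String)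
    (calls : List String) :
    rs.foldl (fun labels r => pvPass r.1 r.2 labels calls) (calls.map g)
      = calls.map (fun c => rs.foldl (pvStep c) (g c)) := by
  induction rs generalizing g with
  | nil => simp
  | cons r rs ih =>
    simp only [List.foldl_cons]
    rw [pvPass_map r.1 r.2 g calls, ih]

lemma alt_eq (calls : List String) :
    identify_side_effects_py_alt calls
      = (calls.map (fun c => pvRules.foldl (pvStep c) none)).filterMap id := by
  unfold identify_side_effects_py_alt
  have h : List.replicate calls.length (none : Option String) = calls.map (fun _ => none) := by
    simp
  rw [h, foldl_pass_map]

set_option maxHeartbeats 2000000 in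
lemma fold_eq (calls : List String) (acc : List String) :
    List.foldl (fun side_effects call =>
      let call_lower := PySem.Str.lower call
      if ["save", "create", "update", "delete"].any (fun word => PySem.Str.isIn word call_lower) then
        side_effects ++ ["Data modification: " ++ call]
      else if ["send", "notify", "email", "publish"].any (fun word => PySem.Str.isIn word call_lower) then
        side_effects ++ ["External communication: " ++ call]
      else if ["log", "track", "audit"].any (fun word => PySem.Str.isIn word call_lower) then
        side_effects ++ ["Logging/auditing: " ++ call]
      else if ["cache", "store", "session"].any (fun word => PySem.Str.isIn word call_lower) then
        side_effects ++ ["State modification: " ++ call]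
      else side_effects) acc calls
    = acc ++ (calls.map (fun c => pvRules.foldl (pvStep c) none)).filterMap id := by
  induction calls generalizing acc with
  | nil => simp
  | cons x xs ih =>
    simp only [List.foldl_cons, List.map_cons, List.filterMap_cons, ih]
    clear ih
    cases h1 : (["save", "create", "update", "delete"].any (fun word => PySem.Str.isIn word (PySem.Str.lower x))) <;>
    cases h2 : (["send", "notify", "email", "publish"].any (fun word => PySem.Str.isIn word (PySem.Str.lower x))) <;>
    cases h3 : (["log", "track", "audit"].any (fun word => PySem.Str.isIn word (PySem.Str.lower x))) <;>
    cases h4 : (["cache", "store", "session"].any (fun word => PySem.Str.isIn word (PySem.Str.lower x))) <;>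
    simp_all [pvStep, pvRules, List.foldl]

-- ===== VERDICT (by name: the statement is the Claim_ definition above) =====
theorem identify_side_effects_py_spec : Claim_equal_identify_side_effects_py := by
  intro calls _
  unfold Spec_identify_side_effects_py identify_side_effects_py
  rw [alt_eq]
  simpa using fold_eq calls []
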